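-- pv_equiv track=rewrite | github.com/breivens/scriptingtalen | exercise series (2019–2020)/week_04 [Python]/Mountain climbers.py | contour_lines
-- ===== SOURCE A (Python) =====
-- def peak(profile):
--     return max(profile)
--
-- def levels(profile):
--     return sorted(set(profile))
--
-- def tussenpunten(profile):
--     points = []
--     altitudes = levels(profile)
--     for h, height in enumerate(profile):
--         points.append((height, True))
--         if h != len(profile) - 1:
--             next_height = profile[h + 1]
--             alt = altitudes if height < next_height else altitudes[::-1]
--             i = 0
--             while alt[i] != next_height:
--                 if height < alt[i] < next_height:
--                     points.append((alt[i], False))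
--                 elif height > alt[i] > next_height:
--                     points.append((alt[i], False))
--                 i += 1
--     return points
--
-- def contour_lines(profile):
--     contour = {p: (set(), set()) for p in profile}
--     reached_peak = 0
--     for i, item in enumerate(tussenpunten(profile)):
--         index_key, boolean = item
--         value = tuple((i, boolean))
--         if index_key == peak(profile):
--             contour[index_key][0].add(value)
--             reached_peak = 1
--         contour[index_key][reached_peak].add(value)
--     return contour
-- ===== SOURCE B (Python) =====
-- def _bisect_right(a, x):
--     lo, hi = 0, len(a)
--     while lo < hi:
--         mid = (lo + hi) // 2
--         if x < a[mid]:
--             hi = mid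
--         else:
--             lo = mid + 1
--     return lo
--
--
-- def _bisect_left(a, x):
--     lo, hi = 0, len(a)
--     while lo < hi:
--         mid = (lo + hi) // 2
--         if a[mid] < x:
--             lo = mid + 1
--         else:
--             hi = mid
--     return lo
--
--
-- def contour_lines(profile):
--     lv = sorted(set(profile))
--     top = lv[-1]
--     points = []
--     for h, nxt in zip(profile, profile[1:]):
--         points.append((h, True))
--         low, high = (h, nxt) if h < nxt else (nxt, h)
--         mids = lv[_bisect_right(lv, low):_bisect_left(lv, high)]
--         if h < nxt:
--             points.extend((a, False) for a in mids)
--         else: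
--             points.extend((a, False) for a in reversed(mids))
--     points.append((profile[-1], True))
--     first_top = next(i for i, pt in enumerate(points) if pt[0] == top)
--     contour = {p: (set(), set()) for p in profile}
--     for i, pt in enumerate(points[:first_top]):
--         contour[pt[0]][0].add((i, pt[1]))
--     for i, pt in enumerate(points[first_top:], first_top):
--         if pt[0] == top:
--             contour[top][0].add((i, pt[1]))
--         contour[pt[0]][1].add((i, pt[1]))
--     return contour
-- ===== Notes on version B (the rewrite author's own statement) =====
-- stated objective: faster
-- what changed: B computes max and the sorted levels once, locates each pair's intermediate-level range with a hand-written binary search and a list slice instead of A's linear sentinel scan over the (possibly reversed) level list, and replaces A's mutable reached_peak flag loop (which recomputes max(profile) per point) by slicing the point list at the first peak index and filling the two set components in two separate loops.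
-- outside the precondition, e.g. on contour_lines([]): A returns {}, B raises IndexError
import Mathlib
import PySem

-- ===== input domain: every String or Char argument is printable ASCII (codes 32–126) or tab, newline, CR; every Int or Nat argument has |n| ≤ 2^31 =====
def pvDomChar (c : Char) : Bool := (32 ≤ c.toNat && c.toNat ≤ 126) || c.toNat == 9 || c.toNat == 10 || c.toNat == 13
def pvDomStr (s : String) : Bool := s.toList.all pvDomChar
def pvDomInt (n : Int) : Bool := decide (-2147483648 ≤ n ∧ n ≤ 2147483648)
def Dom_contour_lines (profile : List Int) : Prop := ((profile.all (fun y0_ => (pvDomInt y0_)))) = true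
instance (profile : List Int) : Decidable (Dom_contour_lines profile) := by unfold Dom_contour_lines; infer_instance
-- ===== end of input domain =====

-- B hoists the peak/levels computations, finds each pair's intermediate-level range by binary search
-- plus a slice instead of A's linear sentinel scan, and fills the two set components by slicing the
-- point list at the first peak index (two plain loops) instead of A's mutable flag (objective: faster).


-- ===== PORT A =====
abbrev CSets : Type := List (List (Int × Bool))
abbrev CDict : Type := PySem.Dict Int CSets

-- sets.add on component j of the (set(), set()) pair, ported as a 2-element list of PySem.Sets
def setAdd (sets : CSets) (j : Nat) (v : Int × Bool) : CSets :=
  sets.set j (PySem.Set.add (sets.getD j []) v)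

-- def peak(profile): return max(profile)   (ValueError on []: excluded by Pre_)
def peakA (profile : List Int) : Int := (PySem.List.max? profile (fun x => x)).getD 0

-- def levels(profile): return sorted(set(profile))
def levelsA (profile : List Int) : List Int :=
  PySem.List.sorted (PySem.Set.ofList profile) (fun x => x) false

-- the 'while alt[i] != next_height' loop of tussenpunten, collecting its appends
-- (the [] case is Python's IndexError; unreachable since next_height ∈ alt)
def tpWhile (height nxt : Int) : List Int → List (Int × Bool)
  | [] => []
  | a :: rest =>
    if a = nxt then []
    else if height < a ∧ a < nxt then (a, false) :: tpWhile height nxt rest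
    else if height > a ∧ a > nxt then (a, false) :: tpWhile height nxt rest
    else tpWhile height nxt rest

-- body of tussenpunten's for-loop
def tpStep (profile altitudes : List Int) (points : List (Int × Bool)) (hh : Int × Int) :
    List (Int × Bool) :=
  let points := points ++ [(hh.2, true)]
  if hh.1 ≠ PySem.List.len profile - 1 then
    let next_height := PySem.List.pyGetD profile (hh.1 + 1) 0
    let alt := if hh.2 < next_height then altitudes else altitudes.reverse
    points ++ tpWhile hh.2 next_height alt
  else points

def tussenpunten (profile : List Int) : List (Int × Bool) :=
  (PySem.List.enumerate profile 0).foldl (tpStep profile (levelsA profile)) []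

-- body of contour_lines' for-loop; state = (contour, reached_peak)
def stepA (profile : List Int) (st : CDict × Nat) (item : Int × (Int × Bool)) : CDict × Nat :=
  if item.2.1 = peakA profile then
    let d := st.1.modify item.2.1 [[], []] (fun s => setAdd s 0 (item.1, item.2.2))
    (d.modify item.2.1 [[], []] (fun s => setAdd s 1 (item.1, item.2.2)), 1)
  else
    (st.1.modify item.2.1 [[], []] (fun s => setAdd s st.2 (item.1, item.2.2)), st.2)

def contour_lines (profile : List Int) : List (Int × List (List (Int × Bool))) :=
  let contour : CDict := profile.foldl (fun d p => d.insert p [[], []]) PySem.Dict.empty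
  ((PySem.List.enumerate (tussenpunten profile) 0).foldl (stepA profile) (contour, 0)).1.items

-- ===== PORT B =====
-- the 'while lo < hi' loop of _bisect_right
def brLoop (a : List Int) (x : Int) (lo hi : Int) : Int :=
  if h : lo < hi then
    let mid := PySem.Int.floordiv (lo + hi) 2
    if x < PySem.List.pyGetD a mid 0 then brLoop a x lo mid
    else brLoop a x (mid + 1) hi
  else lo
termination_by (hi - lo).toNat
decreasing_by
  · have hb := (PySem.Int.floordiv_lt_iff_lt_mul (a := lo + hi) (q := hi)
      (by omega : (0:Int) < 2)).mpr (by omega)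
    omega
  · have hb := (PySem.Int.floordiv_two_mid_bounds (le_of_lt h)).1
    omega

def bisectRight (a : List Int) (x : Int) : Int := brLoop a x 0 (PySem.List.len a)

-- the 'while lo < hi' loop of _bisect_left
def blLoop (a : List Int) (x : Int) (lo hi : Int) : Int :=
  if h : lo < hi then
    let mid := PySem.Int.floordiv (lo + hi) 2
    if PySem.List.pyGetD a mid 0 < x then blLoop a x (mid + 1) hi
    else blLoop a x lo mid
  else lo
termination_by (hi - lo).toNat
decreasing_by
  · have hb := (PySem.Int.floordiv_two_mid_bounds (le_of_lt h)).1
    omega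
  · have hb := (PySem.Int.floordiv_lt_iff_lt_mul (a := lo + hi) (q := hi)
      (by omega : (0:Int) < 2)).mpr (by omega)
    omega

def bisectLeft (a : List Int) (x : Int) : Int := blLoop a x 0 (PySem.List.len a)

-- body of B's zip loop: the point itself plus the bisected intermediate-level slice
def stepBpts (lv : List Int) (points : List (Int × Bool)) (p : Int × Int) : List (Int × Bool) :=
  let points := points ++ [(p.1, true)]
  let lohi := if p.1 < p.2 then (p.1, p.2) else (p.2, p.1)
  let mids := PySem.List.slice lv (some (bisectRight lv lohi.1)) (some (bisectLeft lv lohi.2))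
  if p.1 < p.2 then points ++ mids.map (fun a => (a, false))
  else points ++ mids.reverse.map (fun a => (a, false))

-- body of B's first split loop (before the first peak point): component 0 only
def stepB0 (d : CDict) (item : Int × (Int × Bool)) : CDict :=
  d.modify item.2.1 [[], []] (fun s => setAdd s 0 (item.1, item.2.2))

-- body of B's second split loop (from the first peak point on)
def stepB1 (top : Int) (d : CDict) (item : Int × (Int × Bool)) : CDict :=
  let d := if item.2.1 = top then
    d.modify top [[], []] (fun s => setAdd s 0 (item.1, item.2.2)) else d
  d.modify item.2.1 [[], []] (fun s => setAdd s 1 (item.1, item.2.2))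

def contour_lines_alt (profile : List Int) : List (Int × List (List (Int × Bool))) :=
  let lv := PySem.List.sorted (PySem.Set.ofList profile) (fun x => x) false
  let top := PySem.List.pyGetD lv (-1) 0
  let points := (profile.zip (PySem.List.slice profile (some 1) none)).foldl (stepBpts lv) []
  let points := points ++ [(PySem.List.pyGetD profile (-1) 0, true)]
  let ft := points.findIdx (fun q => q.1 == top)
  let contour : CDict := profile.foldl (fun d p => d.insert p [[], []]) PySem.Dict.empty
  let d0 := (PySem.List.enumerate (PySem.List.slice points none (some (ft : Int))) 0).foldl
    stepB0 contour
  ((PySem.List.enumerate (PySem.List.slice points (some (ft : Int)) none) (ft : Int)).foldl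
    (stepB1 top) d0).items

-- ===== PRECONDITION & SPEC =====
-- Pre_ excludes only the empty profile: A happens to return an empty dict there (peak() is never
-- reached inside the empty loop), while B's natural last-level lookup raises IndexError.
def Pre_contour_lines (profile : List Int) : Prop := profile ≠ []
instance (profile : List Int) : Decidable (Pre_contour_lines profile) := by
  unfold Pre_contour_lines; infer_instance
def pvWitness_contour_lines : List Int := [1, 3, 2]

def Spec_contour_lines (profile : List Int) (out : List (Int × List (List (Int × Bool)))) : Prop := out = contour_lines_alt profile
instance (profile : List Int) (out : List (Int × List (List (Int × Bool)))) : Decidable (Spec_contour_lines profile out) := by unfold Spec_contour_lines; infer_instance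

-- ===== CLAIM (what is proved, stated in full; the proofs are below) =====
def Claim_equal_contour_lines : Prop := ∀ (profile : List Int), Dom_contour_lines profile → Pre_contour_lines profile → Spec_contour_lines profile (contour_lines profile)

-- ===== LEMMAS AND PROOFS =====

-- length of a takeWhile prefix, characterised by its split point
theorem takeWhile_len_eq {α : Type} (p : α → Bool) (l : List α) (t : Nat) (htl : t ≤ l.length)
    (h1 : ∀ (i : Nat) (h : i < l.length), i < t → p l[i] = true)
    (h2 : ∀ (h : t < l.length), p l[t] = false) :
    (l.takeWhile p).length = t := by
  induction l generalizing t with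
  | nil => simp only [List.takeWhile_nil, List.length_nil]; simp at htl; omega
  | cons y rest ih =>
    cases t with
    | zero =>
      have := h2 (by simp)
      simp at this
      simp [this]
    | succ t' =>
      have hy : p y = true := h1 0 (by simp) (by omega)
      have hrec := ih t' (by simpa using htl)
        (fun i hi hlt => h1 (i + 1) (by simpa using hi) (by omega))
        (fun h => h2 (by simpa using h))
      simp [hy, hrec]

theorem brLoop_spec (a : List Int) (x : Int) (hs : a.Pairwise (· < ·)) :
    ∀ (n : Nat) (lo hi : Int), (hi - lo).toNat ≤ n → 0 ≤ lo → hi ≤ (a.length : Int) → lo ≤ hi →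
    (∀ (i : Nat) (h : i < a.length), (i : Int) < lo → a[i] ≤ x) →
    (∀ (i : Nat) (h : i < a.length), hi ≤ (i : Int) → x < a[i]) →
    brLoop a x lo hi = ((a.takeWhile (fun y => decide (y ≤ x))).length : Int) := by
  intro n
  induction n with
  | zero =>
    intro lo hi hn h0 hlen hle hlo hhi
    have heq : lo = hi := by omega
    rw [brLoop, dif_neg (by omega)]
    rw [takeWhile_len_eq _ _ lo.toNat (by omega)
      (fun i hi' hlt => by simpa using hlo i hi' (by omega))
      (fun h => by
        have := hhi lo.toNat h (by omega)
        simp only [decide_eq_false_iff_not]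
        omega)]
    omega
  | succ n ih =>
    intro lo hi hn h0 hlen hle hlo hhi
    by_cases hlh : lo < hi
    · rw [brLoop, dif_pos hlh]
      have hmid := PySem.Int.floordiv_two_mid_bounds (le_of_lt hlh)
      have hmidlt := (PySem.Int.floordiv_lt_iff_lt_mul (a := lo + hi) (q := hi)
        (by omega : (0:Int) < 2)).mpr (by omega)
      set mid := PySem.Int.floordiv (lo + hi) 2 with hmiddef
      have hmrange : mid.toNat < a.length := by omega
      have hget : PySem.List.pyGetD a mid 0 = a[mid.toNat] := by
        rw [PySem.List.pyGetD_of_nonneg a 0 (by omega)]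
        exact List.getD_eq_getElem _ _ hmrange
      have hmono := List.pairwise_iff_getElem.mp hs
      by_cases hcmp : x < PySem.List.pyGetD a mid 0
      · rw [if_pos hcmp]
        exact ih lo mid (by omega) h0 (by omega) (by omega) hlo
          (fun i hi' hge => by
            rcases Nat.lt_or_ge mid.toNat i with h | h
            · have := hmono mid.toNat i hmrange hi' h
              rw [hget] at hcmp
              omega
            · have : i = mid.toNat := by omega
              subst this
              rw [hget] at hcmp
              exact hcmp)
      · rw [if_neg hcmp]
        rw [hget] at hcmp
        exact ih (mid + 1) hi (by omega) (by omega) hlen (by omega)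
          (fun i hi' hlt => by
            rcases Nat.lt_or_ge i mid.toNat with h | h
            · have := hmono i mid.toNat hi' hmrange h
              omega
            · have : i = mid.toNat := by omega
              subst this
              omega)
          hhi
    · rw [brLoop, dif_neg hlh]
      have heq : lo = hi := by omega
      rw [takeWhile_len_eq _ _ lo.toNat (by omega)
        (fun i hi' hlt => by simpa using hlo i hi' (by omega))
        (fun h => by
          have := hhi lo.toNat h (by omega)
          simp only [decide_eq_false_iff_not]
          omega)]
      omega

theorem blLoop_spec (a : List Int) (x : Int) (hs : a.Pairwise (· < ·)) :
    ∀ (n : Nat) (lo hi : Int), (hi - lo).toNat ≤ n → 0 ≤ lo → hi ≤ (a.length : Int) → lo ≤ hi →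
    (∀ (i : Nat) (h : i < a.length), (i : Int) < lo → a[i] < x) →
    (∀ (i : Nat) (h : i < a.length), hi ≤ (i : Int) → x ≤ a[i]) →
    blLoop a x lo hi = ((a.takeWhile (fun y => decide (y < x))).length : Int) := by
  intro n
  induction n with
  | zero =>
    intro lo hi hn h0 hlen hle hlo hhi
    rw [blLoop, dif_neg (by omega)]
    rw [takeWhile_len_eq _ _ lo.toNat (by omega)
      (fun i hi' hlt => by simpa using hlo i hi' (by omega))
      (fun h => by
        have := hhi lo.toNat h (by omega)
        simp only [decide_eq_false_iff_not]
        omega)]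
    omega
  | succ n ih =>
    intro lo hi hn h0 hlen hle hlo hhi
    by_cases hlh : lo < hi
    · rw [blLoop, dif_pos hlh]
      have hmid := PySem.Int.floordiv_two_mid_bounds (le_of_lt hlh)
      have hmidlt := (PySem.Int.floordiv_lt_iff_lt_mul (a := lo + hi) (q := hi)
        (by omega : (0:Int) < 2)).mpr (by omega)
      set mid := PySem.Int.floordiv (lo + hi) 2 with hmiddef
      have hmrange : mid.toNat < a.length := by omega
      have hget : PySem.List.pyGetD a mid 0 = a[mid.toNat] := by
        rw [PySem.List.pyGetD_of_nonneg a 0 (by omega)]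
        exact List.getD_eq_getElem _ _ hmrange
      have hmono := List.pairwise_iff_getElem.mp hs
      by_cases hcmp : PySem.List.pyGetD a mid 0 < x
      · rw [if_pos hcmp]
        rw [hget] at hcmp
        exact ih (mid + 1) hi (by omega) (by omega) hlen (by omega)
          (fun i hi' hlt => by
            rcases Nat.lt_or_ge i mid.toNat with h | h
            · have := hmono i mid.toNat hi' hmrange h
              omega
            · have : i = mid.toNat := by omega
              subst this
              omega)
          hhi
      · rw [if_neg hcmp]
        rw [hget] at hcmp
        exact ih lo mid (by omega) h0 (by omega) (by omega) hlo
          (fun i hi' hge => by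
            rcases Nat.lt_or_ge mid.toNat i with h | h
            · have := hmono mid.toNat i hmrange hi' h
              omega
            · have : i = mid.toNat := by omega
              subst this
              omega)
    · rw [blLoop, dif_neg hlh]
      rw [takeWhile_len_eq _ _ lo.toNat (by omega)
        (fun i hi' hlt => by simpa using hlo i hi' (by omega))
        (fun h => by
          have := hhi lo.toNat h (by omega)
          simp only [decide_eq_false_iff_not]
          omega)]
      omega

-- on a strictly sorted list, the take/drop window between the two takeWhile lengths is the filter
theorem window_eq_filter (lo hi : Int) (hlh : lo ≤ hi) :
    ∀ (l : List Int), l.Pairwise (· < ·) →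
    ((l.take (l.takeWhile (fun y => decide (y < hi))).length).drop
        (l.takeWhile (fun y => decide (y ≤ lo))).length)
      = l.filter (fun y => decide (lo < y ∧ y < hi)) := by
  intro l
  induction l with
  | nil => simp
  | cons y t ih =>
    intro hp
    rw [List.pairwise_cons] at hp
    obtain ⟨hy, hp'⟩ := hp
    by_cases h1 : y ≤ lo
    · by_cases h2 : y < hi
      · simp only [List.takeWhile_cons, decide_eq_true_eq, if_pos h2, if_pos h1,
          List.length_cons, List.take_succ_cons, List.drop_succ_cons]
        rw [ih hp', List.filter_cons]
        simp only [decide_eq_true_eq]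
        rw [if_neg (by omega : ¬ (lo < y ∧ y < hi))]
      · have : lo = hi := by omega
        subst this
        have hl0 : ((y :: t).takeWhile (fun z => decide (z < lo))).length = 0 := by
          simp only [List.takeWhile_cons, decide_eq_true_eq]
          rw [if_neg (by omega)]
          simp
        rw [hl0, List.take_zero, List.drop_nil]
        rw [List.filter_eq_nil_iff.mpr (fun z _ => by
          simp only [decide_eq_true_eq]
          omega)]
    · have hr0 : ((y :: t).takeWhile (fun z => decide (z ≤ lo))).length = 0 := by
        simp only [List.takeWhile_cons, decide_eq_true_eq]
        rw [if_neg h1]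
        simp
      rw [hr0, List.drop_zero]
      by_cases h2 : y < hi
      · simp only [List.takeWhile_cons, decide_eq_true_eq, if_pos h2, List.length_cons,
          List.take_succ_cons]
        have hrt : (t.takeWhile (fun z => decide (z ≤ lo))).length = 0 := by
          cases t with
          | nil => simp
          | cons z t' =>
            have := hy z (by simp)
            simp only [List.takeWhile_cons, decide_eq_true_eq]
            rw [if_neg (by omega)]
            simp
        have := ih hp'
        rw [hrt, List.drop_zero] at this
        rw [this, List.filter_cons]
        simp only [decide_eq_true_eq]
        rw [if_pos (by omega : lo < y ∧ y < hi)]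
      · simp only [List.takeWhile_cons, decide_eq_true_eq, if_neg h2, List.length_nil,
          List.take_zero]
        rw [List.filter_eq_nil_iff.mpr (fun z hz => by
          simp only [decide_eq_true_eq]
          rcases List.mem_cons.mp hz with h | h
          · subst h; omega
          · have := hy z h; omega)]

-- the bisected slice is exactly the strictly-between filter, on a strictly sorted list
theorem mids_eq (lv : List Int) (hs : lv.Pairwise (· < ·)) (lo hi : Int) (hlh : lo ≤ hi) :
    PySem.List.slice lv (some (bisectRight lv lo)) (some (bisectLeft lv hi))
      = lv.filter (fun a => decide (lo < a ∧ a < hi)) := by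
  have hr := brLoop_spec lv lo hs ((PySem.List.len lv - 0).toNat) 0 (PySem.List.len lv)
    (by omega) (by omega) (by rw [PySem.List.len_eq]) (by rw [PySem.List.len_eq]; omega)
    (fun i _ hlt => by omega)
    (fun i hi' hge => by rw [PySem.List.len_eq] at hge; omega)
  have hl := blLoop_spec lv hi hs ((PySem.List.len lv - 0).toNat) 0 (PySem.List.len lv)
    (by omega) (by omega) (by rw [PySem.List.len_eq]) (by rw [PySem.List.len_eq]; omega)
    (fun i _ hlt => by omega)
    (fun i hi' hge => by rw [PySem.List.len_eq] at hge; omega)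
  rw [bisectRight, bisectLeft, hr, hl, PySem.List.slice_natCast, ← List.drop_take]
  exact window_eq_filter lo hi hlh lv hs

-- ascending scan = filter, on a strictly increasing list containing nxt
theorem tpWhile_asc (height nxt : Int) (l : List Int) (hp : l.Pairwise (· < ·)) (hm : nxt ∈ l) :
    tpWhile height nxt l
      = (l.filter (fun a => decide (height < a ∧ a < nxt))).map (fun a => (a, false)) := by
  induction l with
  | nil => cases hm
  | cons a rest ih =>
    rw [List.pairwise_cons] at hp
    obtain ⟨ha, hp'⟩ := hp
    by_cases hanxt : a = nxt
    · subst hanxt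
      have hrest : rest.filter (fun x => decide (height < x ∧ x < a)) = [] := by
        rw [List.filter_eq_nil_iff]
        intro b hb
        have := ha b hb
        simp only [decide_eq_true_eq, not_and]
        omega
      simp [tpWhile]
      intro b hb _
      exact le_of_lt (ha b hb)
    · have hnr : nxt ∈ rest := by
        rcases List.mem_cons.mp hm with h | h
        · exact absurd h.symm hanxt
        · exact h
      have hanlt : a < nxt := ha nxt hnr
      rw [List.filter_cons]
      by_cases hha : height < a
      · have h2 : ¬ (height > a ∧ a > nxt) := by omega
        simp only [tpWhile, if_neg hanxt, if_pos (show height < a ∧ a < nxt from ⟨hha, hanlt⟩),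
          ih hp' hnr]
        simp only [decide_eq_true_eq]
        rw [if_pos (show height < a ∧ a < nxt from ⟨hha, hanlt⟩)]
        simp
      · have h1 : ¬ (height < a ∧ a < nxt) := by omega
        have h2 : ¬ (height > a ∧ a > nxt) := by omega
        simp only [tpWhile, if_neg hanxt, if_neg h1, if_neg h2, ih hp' hnr]
        simp only [decide_eq_true_eq]
        rw [if_neg h1]

-- descending scan = filter, on a strictly decreasing list containing nxt, when nxt ≤ height
theorem tpWhile_desc (height nxt : Int) (l : List Int) (hp : l.Pairwise (· > ·)) (hm : nxt ∈ l)
    (hle : nxt ≤ height) :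
    tpWhile height nxt l
      = (l.filter (fun a => decide (nxt < a ∧ a < height))).map (fun a => (a, false)) := by
  induction l with
  | nil => cases hm
  | cons a rest ih =>
    rw [List.pairwise_cons] at hp
    obtain ⟨ha, hp'⟩ := hp
    by_cases hanxt : a = nxt
    · subst hanxt
      have hrest : rest.filter (fun x => decide (a < x ∧ x < height)) = [] := by
        rw [List.filter_eq_nil_iff]
        intro b hb
        have := ha b hb
        simp only [decide_eq_true_eq, not_and]
        omega
      simp [tpWhile]
      intro b hb hab
      exact absurd hab (by have := ha b hb; omega)
    · have hnr : nxt ∈ rest := by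
        rcases List.mem_cons.mp hm with h | h
        · exact absurd h.symm hanxt
        · exact h
      have hagt : a > nxt := ha nxt hnr
      have h1 : ¬ (height < a ∧ a < nxt) := by omega
      rw [List.filter_cons]
      by_cases hha : a < height
      · simp only [tpWhile, if_neg hanxt, if_neg h1, if_pos (show height > a ∧ a > nxt by omega),
          ih hp' hnr]
        simp only [decide_eq_true_eq]
        rw [if_pos (show nxt < a ∧ a < height from ⟨hagt, hha⟩)]
        simp
      · have h2 : ¬ (height > a ∧ a > nxt) := by omega
        simp only [tpWhile, if_neg hanxt, if_neg h1, if_neg h2, ih hp' hnr]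
        simp only [decide_eq_true_eq]
        rw [if_neg (by omega : ¬ (nxt < a ∧ a < height))]

-- the per-element contribution of A's tussenpunten loop
def fA (profile lv : List Int) (hh : Int × Int) : List (Int × Bool) :=
  (hh.2, true) ::
    (if hh.1 ≠ PySem.List.len profile - 1 then
      tpWhile hh.2 (PySem.List.pyGetD profile (hh.1 + 1) 0)
        (if hh.2 < PySem.List.pyGetD profile (hh.1 + 1) 0 then lv else lv.reverse)
    else [])

theorem tpStep_eq (profile lv : List Int) (pts : List (Int × Bool)) (hh : Int × Int) :
    tpStep profile lv pts hh = pts ++ fA profile lv hh := by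
  simp only [tpStep, fA]
  split <;> simp

-- the per-element contribution of B's zip loop, in filter form
def gB (lv : List Int) (p : Int × Int) : List (Int × Bool) :=
  (p.1, true) ::
    (if p.1 < p.2 then
      (lv.filter (fun a => decide (p.1 < a ∧ a < p.2))).map (fun a => (a, false))
    else
      (lv.reverse.filter (fun a => decide (p.2 < a ∧ a < p.1))).map (fun a => (a, false)))

theorem stepBpts_eq (lv : List Int) (hs : lv.Pairwise (· < ·)) (pts : List (Int × Bool))
    (p : Int × Int) : stepBpts lv pts p = pts ++ gB lv p := by
  simp only [stepBpts, gB]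
  by_cases hlt : p.1 < p.2
  · rw [if_pos hlt, if_pos hlt, if_pos hlt, mids_eq lv hs p.1 p.2 (le_of_lt hlt)]
    simp
  · rw [if_neg hlt, if_neg hlt, if_neg hlt,
      mids_eq lv hs p.2 p.1 (by omega), ← List.filter_reverse]
    simp

-- common shape of the point list
def specPts (lv : List Int) : List Int → List (Int × Bool)
  | [] => []
  | [x] => [(x, true)]
  | x :: y :: t => gB lv (x, y) ++ specPts lv (y :: t)

theorem pointsA_eq_spec (profile : List Int) :
    ∀ (s : Nat) (l : List Int), l = profile.drop s → l ≠ [] →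
    (PySem.List.enumerate l (s : Int)).flatMap (fA profile (levelsA profile))
      = specPts (levelsA profile) l := by
  intro s l
  induction l generalizing s with
  | nil => intro _ h; exact absurd rfl h
  | cons x t ih =>
    intro hl _
    have hslt : s < profile.length := by
      by_contra hc
      rw [List.drop_eq_nil_of_le (by omega)] at hl
      exact List.cons_ne_nil x t hl
    rw [List.drop_eq_getElem_cons hslt] at hl
    have ht : t = profile.drop (s + 1) := by injection hl
    rw [PySem.List.enumerate_cons, List.flatMap_cons]
    cases t with
    | nil =>
      have hlen : profile.length = s + 1 := by
        have h0 : profile.length ≤ s + 1 := by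
          rw [← List.drop_eq_nil_iff]
          exact ht.symm
        omega
      simp [fA, specPts]
      intro hc
      exfalso
      apply hc
      rw [hlen]
      push_cast
      ring
    | cons y t' =>
      have hs1 : s + 1 < profile.length := by
        by_contra hc
        rw [List.drop_eq_nil_of_le (by omega)] at ht
        exact List.cons_ne_nil y t' ht
      have hy : y = profile[s + 1] := by
        rw [List.drop_eq_getElem_cons hs1] at ht
        injection ht
      have hcond : (s : Int) ≠ PySem.List.len profile - 1 := by
        simp only [PySem.List.len_eq]
        omega
      have hnxt : PySem.List.pyGetD profile ((s : Int) + 1) 0 = y := by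
        rw [show ((s : Int) + 1) = ((s + 1 : Nat) : Int) by push_cast; ring,
          PySem.List.pyGetD_natCast, List.getD_eq_getElem _ _ hs1, hy]
      have hpair : (levelsA profile).Pairwise (· < ·) :=
        PySem.List.sorted_ofList_pairwise_lt profile
      have hyml : y ∈ levelsA profile := by
        rw [levelsA, PySem.List.mem_sorted, PySem.Set.mem_ofList, hy]
        exact List.getElem_mem hs1
      have hfa : fA profile (levelsA profile) ((s : Int), x) = gB (levelsA profile) (x, y) := by
        simp only [fA, gB]
        rw [if_pos hcond, hnxt]
        by_cases hlt : x < y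
        · rw [if_pos hlt, if_pos hlt, tpWhile_asc x y _ hpair hyml]
        · rw [if_neg hlt, if_neg hlt,
            tpWhile_desc x y _ (List.pairwise_reverse.mpr (hpair.imp (fun h => h)))
              (List.mem_reverse.mpr hyml) (by omega)]
      rw [hfa]
      have hrest : (PySem.List.enumerate (y :: t') ((s : Int) + 1)).flatMap
          (fA profile (levelsA profile)) = specPts (levelsA profile) (y :: t') := by
        rw [show ((s : Int) + 1) = ((s + 1 : Nat) : Int) by push_cast; ring]
        exact ih (s + 1) ht (List.cons_ne_nil y t')
      rw [hrest]
      rfl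

theorem pointsB_eq_spec (lv : List Int) :
    ∀ (l : List Int) (h : l ≠ []),
    (l.zip l.tail).flatMap (gB lv) ++ [(l.getLast h, true)] = specPts lv l := by
  intro l
  induction l with
  | nil => intro h; exact absurd rfl h
  | cons x t ih =>
    intro _
    cases t with
    | nil => simp [specPts]
    | cons y t' =>
      have hz : (x :: y :: t').zip (x :: y :: t').tail
          = (x, y) :: ((y :: t').zip (y :: t').tail) := by
        simp [List.zip_cons_cons]
      rw [hz, List.flatMap_cons, List.getLast_cons (List.cons_ne_nil y t')]
      rw [List.append_assoc, ih (List.cons_ne_nil y t')]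
      rfl

-- both point lists equal the common shape
theorem points_eq (profile : List Int) (h : profile ≠ []) :
    tussenpunten profile
      = (profile.zip (PySem.List.slice profile (some 1) none)).foldl
          (stepBpts (levelsA profile)) [] ++ [(PySem.List.pyGetD profile (-1) 0, true)] := by
  have hpair : (levelsA profile).Pairwise (· < ·) :=
    PySem.List.sorted_ofList_pairwise_lt profile
  have hA : tussenpunten profile = specPts (levelsA profile) profile := by
    rw [tussenpunten,
      show tpStep profile (levelsA profile)
          = (fun acc hh => acc ++ fA profile (levelsA profile) hh) from
        funext fun a => funext fun b => tpStep_eq profile (levelsA profile) a b,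
      PySem.List.foldl_append_eq_flatMap, List.nil_append]
    have h0 := pointsA_eq_spec profile 0 profile (by simp) h
    simpa using h0
  have hB : (profile.zip (PySem.List.slice profile (some 1) none)).foldl
      (stepBpts (levelsA profile)) [] ++ [(PySem.List.pyGetD profile (-1) 0, true)]
      = specPts (levelsA profile) profile := by
    rw [PySem.List.slice_from_one,
      show stepBpts (levelsA profile)
          = (fun acc p => acc ++ gB (levelsA profile) p) from
        funext fun a => funext fun b => stepBpts_eq (levelsA profile) hpair a b,
      PySem.List.foldl_append_eq_flatMap, List.nil_append,
      PySem.List.pyGetD_neg_one profile 0 h]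
    exact pointsB_eq_spec (levelsA profile) profile h
  rw [hA, hB]

-- the last element of a strictly increasing list is its maximum element
theorem getLast_eq_max (l : List Int) (hl : l ≠ []) (hp : l.Pairwise (· < ·)) (m : Int)
    (hm : m ∈ l) (hmax : ∀ y ∈ l, y ≤ m) : l.getLast hl = m := by
  have hmono := List.pairwise_iff_getElem.mp hp
  obtain ⟨i, hilt, hieq⟩ := List.mem_iff_getElem.mp hm
  have h1 : l.getLast hl ≤ m := hmax _ (List.getLast_mem hl)
  have h2 : m ≤ l.getLast hl := by
    rw [List.getLast_eq_getElem hl, ← hieq]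
    rcases Nat.lt_or_ge i (l.length - 1) with hcase | hcase
    · exact le_of_lt (hmono i (l.length - 1) hilt (by omega) hcase)
    · have : i = l.length - 1 := by omega
      subst this; exact le_rfl
  omega

-- lv[-1] of the sorted distinct levels is max(profile)
theorem top_eq (profile : List Int) (h : profile ≠ []) :
    PySem.List.pyGetD (levelsA profile) (-1) 0 = peakA profile := by
  have hofne : PySem.Set.ofList profile ≠ [] := by
    cases profile with
    | nil => exact absurd rfl h
    | cons a t =>
      intro hc
      have hmem : a ∈ PySem.Set.ofList (a :: t) :=
        (PySem.Set.mem_ofList _ _).mpr List.mem_cons_self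
      rw [hc] at hmem
      cases hmem
  have hlvne : levelsA profile ≠ [] := fun hc =>
    hofne ((PySem.List.sorted_eq_nil_iff _ _ _).mp hc)
  rw [PySem.List.pyGetD_neg_one _ 0 hlvne]
  obtain ⟨m, hm⟩ : ∃ m, PySem.List.max? profile (fun x => x) = some m := by
    cases hmx : PySem.List.max? profile (fun x => x) with
    | none => exact absurd ((PySem.List.max?_eq_none_iff _ _).mp hmx) h
    | some m => exact ⟨m, rfl⟩
  have hmax := PySem.List.max?_isMax hm
  have hpeak : peakA profile = m := by rw [peakA, hm]; rfl
  rw [hpeak]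
  have hpair : (levelsA profile).Pairwise (· < ·) :=
    PySem.List.sorted_ofList_pairwise_lt profile
  have hmlv : m ∈ levelsA profile := by
    rw [levelsA, PySem.List.mem_sorted, PySem.Set.mem_ofList]
    exact PySem.List.max?_mem hm
  have hmaxlv : ∀ y ∈ levelsA profile, y ≤ m := by
    intro y hy
    rw [levelsA, PySem.List.mem_sorted, PySem.Set.mem_ofList] at hy
    exact hmax y hy
  exact getLast_eq_max (levelsA profile) hlvne hpair m hmlv hmaxlv

-- phase 0 of A's flagged loop (no peak key yet) is B's first split loop
theorem foldA_phase0 (profile : List Int) :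
    ∀ (l : List (Int × Bool)) (s : Int) (d : CDict),
    (∀ q ∈ l, q.1 ≠ peakA profile) →
    (PySem.List.enumerate l s).foldl (stepA profile) (d, 0)
      = ((PySem.List.enumerate l s).foldl stepB0 d, 0) := by
  intro l
  induction l with
  | nil => intro s d _; rfl
  | cons q t ih =>
    intro s d hq
    rw [PySem.List.enumerate_cons, List.foldl_cons, List.foldl_cons]
    have h1 : stepA profile (d, 0) (s, q) = (stepB0 d (s, q), 0) := by
      simp only [stepA, stepB0]
      rw [if_neg (hq q (by simp))]
    rw [h1]
    exact ih (s + 1) _ (fun p hp => hq p (by simp [hp]))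

-- phase 1 of A's flagged loop (flag already set) is B's second split loop
theorem foldA_phase1 (profile : List Int) :
    ∀ (l : List (Int × Bool)) (s : Int) (d : CDict),
    (PySem.List.enumerate l s).foldl (stepA profile) (d, 1)
      = ((PySem.List.enumerate l s).foldl (stepB1 (peakA profile)) d, 1) := by
  intro l
  induction l with
  | nil => intro s d; rfl
  | cons q t ih =>
    intro s d
    rw [PySem.List.enumerate_cons, List.foldl_cons, List.foldl_cons]
    have h1 : stepA profile (d, 1) (s, q) = (stepB1 (peakA profile) d (s, q), 1) := by
      simp only [stepA, stepB1]
      by_cases hk : q.1 = peakA profile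
      · rw [if_pos hk, if_pos hk, hk]
      · rw [if_neg hk, if_neg hk]
    rw [h1]
    exact ih (s + 1) _

-- at a peak key, A's step (any flag) is B's second-loop step, and the flag is set
theorem stepA_peak (profile : List Int) (d : CDict) (r : Nat) (s : Int) (q : Int × Bool)
    (hk : q.1 = peakA profile) :
    stepA profile (d, r) (s, q) = (stepB1 (peakA profile) d (s, q), 1) := by
  simp only [stepA, stepB1]
  rw [if_pos hk, if_pos hk, hk]

-- every profile element appears as a True point in the common shape
theorem mem_true_specPts (lv : List Int) :
    ∀ (l : List Int) (x : Int), x ∈ l → (x, true) ∈ specPts lv l := by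
  intro l
  induction l with
  | nil => intro x hx; cases hx
  | cons y t ih =>
    intro x hx
    cases t with
    | nil =>
      rcases List.mem_cons.mp hx with h | h
      · subst h; simp [specPts]
      · cases h
    | cons z t' =>
      rcases List.mem_cons.mp hx with h | h
      · subst h
        show (x, true) ∈ gB lv (x, z) ++ specPts lv (z :: t')
        simp [gB]
      · show (x, true) ∈ gB lv (y, z) ++ specPts lv (z :: t')
        exact List.mem_append_right _ (ih x h)

-- A's flagged fold over the whole point list = B's two split folds
theorem fold_split (profile : List Int) (pts : List (Int × Bool)) (d : CDict)
    (hex : ∃ q ∈ pts, q.1 = peakA profile) :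
    ((PySem.List.enumerate pts 0).foldl (stepA profile) (d, 0)).1
      = ((PySem.List.enumerate
            (pts.drop (pts.findIdx (fun q => q.1 == peakA profile)))
            ((pts.findIdx (fun q => q.1 == peakA profile) : Int))).foldl
          (stepB1 (peakA profile))
          ((PySem.List.enumerate
              (pts.take (pts.findIdx (fun q => q.1 == peakA profile))) 0).foldl stepB0 d)) := by
  set ft := pts.findIdx (fun q => q.1 == peakA profile) with hft
  have hftlt : ft < pts.length := by
    obtain ⟨q, hq, hqeq⟩ := hex
    exact List.findIdx_lt_length_of_exists ⟨q, hq, by simpa using hqeq⟩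
  have hsplit : pts = pts.take ft ++ pts.drop ft := (List.take_append_drop ft pts).symm
  have htlen : (pts.take ft).length = ft := by simp; omega
  conv_lhs => rw [hsplit]
  rw [PySem.List.enumerate_append, List.foldl_append]
  have hpre : ∀ q ∈ pts.take ft, q.1 ≠ peakA profile := by
    intro q hq
    obtain ⟨i, hi, hieq⟩ := List.mem_iff_getElem.mp hq
    have hift : i < ft := by
      have := hi; rw [htlen] at this; exact this
    have := List.not_of_lt_findIdx (p := fun q => q.1 == peakA profile) (xs := pts)
      (i := i) (by omega)
    rw [List.getElem_take] at hieq
    rw [← hieq]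
    simpa using this
  rw [foldA_phase0 profile _ 0 d hpre]
  have hdrop : pts.drop ft = pts[ft] :: pts.drop (ft + 1) := List.drop_eq_getElem_cons hftlt
  have hkey : (pts[ft]).1 = peakA profile := by
    have := List.findIdx_getElem (p := fun q => q.1 == peakA profile) (xs := pts) (w := hftlt)
    simpa using this
  rw [htlen, zero_add, hdrop]
  simp only [PySem.List.enumerate_cons, List.foldl_cons]
  rw [stepA_peak profile _ 0 (ft : Int) pts[ft] hkey, foldA_phase1 profile]

-- ===== VERDICT (by name: the statement is the Claim_ definition above) =====
theorem contour_lines_spec : Claim_equal_contour_lines := by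
  intro profile _ hpre
  unfold Spec_contour_lines
  simp only [contour_lines, contour_lines_alt]
  rw [show (PySem.List.sorted (PySem.Set.ofList profile) fun x => x) = levelsA profile from rfl]
  rw [top_eq profile hpre, ← points_eq profile hpre]
  set pts := tussenpunten profile with hptsdef
  set ft := pts.findIdx (fun q => q.1 == peakA profile) with hftdef
  rw [PySem.List.slice_to_natCast, PySem.List.slice_from_natCast]
  have hex : ∃ q ∈ pts, q.1 = peakA profile := by
    have htop_mem : peakA profile ∈ profile := by
      obtain ⟨m, hm⟩ : ∃ m, PySem.List.max? profile (fun x => x) = some m := by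
        cases hmx : PySem.List.max? profile (fun x => x) with
        | none => exact absurd ((PySem.List.max?_eq_none_iff _ _).mp hmx) hpre
        | some m => exact ⟨m, rfl⟩
      rw [peakA, hm]
      exact PySem.List.max?_mem hm
    have hApts : pts = specPts (levelsA profile) profile := by
      rw [hptsdef, tussenpunten,
        show tpStep profile (levelsA profile)
            = (fun acc hh => acc ++ fA profile (levelsA profile) hh) from
          funext fun a => funext fun b => tpStep_eq profile (levelsA profile) a b,
        PySem.List.foldl_append_eq_flatMap, List.nil_append]
      have h0 := pointsA_eq_spec profile 0 profile (by simp) hpre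
      simpa using h0
    exact ⟨(peakA profile, true), by
      rw [hApts]; exact mem_true_specPts (levelsA profile) profile _ htop_mem, rfl⟩
  exact congrArg PySem.Dict.items (fold_split profile pts _ hex)
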